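-- pv_equiv track=rewrite | github.com/Gyusik-Choi/algorithm | programmers/명예의 전당 (1)/명예의 전당 (1).py | solution
-- ===== SOURCE A (Python) =====
-- def solution(k, score):
--     hall_of_fame = []
--     lowest_points_from_hall_of_fame = []
--
--     for idx, s in enumerate(score):
--         hall_of_fame.append(s)
--         hall_of_fame.sort(reverse=True)
--
--         if len(hall_of_fame) > k:
--             hall_of_fame.pop()
--
--         lowest_points_from_hall_of_fame.append(hall_of_fame[-1])
--
--     return lowest_points_from_hall_of_fame
-- ===== SOURCE B (Python) =====
-- def solution(k, score):
--     top = []            # ascending list of the current top-k scores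
--     res = []
--     for s in score:
--         # binary search for the leftmost insertion point (no sort call)
--         lo, hi = 0, len(top)
--         while lo < hi:
--             mid = (lo + hi) // 2
--             if top[mid] < s:
--                 lo = mid + 1
--             else:
--                 hi = mid
--         top.insert(lo, s)
--         if len(top) > k:
--             del top[0]
--         res.append(top[0])
--     return res
-- ===== Notes on version B (the rewrite author's own statement) =====
-- stated objective: faster
-- what changed: Instead of re-sorting the whole top-k list after every append, B keeps the list ascending and places each score with a hand-written binary search plus one positional insert, evicting the smallest from the front.
import Mathlib
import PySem

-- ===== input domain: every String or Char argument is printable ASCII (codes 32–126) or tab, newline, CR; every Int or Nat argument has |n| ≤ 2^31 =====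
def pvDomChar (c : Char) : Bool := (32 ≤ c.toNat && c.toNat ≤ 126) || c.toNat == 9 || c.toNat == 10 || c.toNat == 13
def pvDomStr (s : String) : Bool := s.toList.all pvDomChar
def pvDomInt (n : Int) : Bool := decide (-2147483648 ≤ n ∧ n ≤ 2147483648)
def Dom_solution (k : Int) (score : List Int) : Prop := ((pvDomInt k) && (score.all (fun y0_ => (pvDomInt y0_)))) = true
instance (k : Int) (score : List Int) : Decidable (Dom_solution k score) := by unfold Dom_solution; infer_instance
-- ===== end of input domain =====

-- B replaces A's per-element full re-sort of the top-k list by a hand-written binary search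
-- and a single positional insert into a list kept ascending (objective: faster, constant-factor).


-- ===== PORT A =====
-- literal transliteration of A: for each score, append, sort(reverse=True), pop the last
-- element when the hall exceeds k (hall.pop() discards its result: dropLast; the hall is
-- nonempty there, where Python's pop is exact), record hall[-1] (pyGetD: in range under Pre_).
def solution (k : Int) (score : List Int) : List Int :=
  ((PySem.List.enumerate score 0).foldl
    (fun (st : List Int × List Int) p =>
      let hall1 := PySem.List.sorted (st.1 ++ [p.2]) (fun x => x) true
      let hall2 := if (hall1.length : Int) > k then hall1.dropLast else hall1
      (hall2, st.2 ++ [PySem.List.pyGetD hall2 (-1) 0]))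
    ([], [])).2

-- ===== PORT B =====
-- B's while-loop: binary search for the leftmost index where s could be inserted.
-- (lo + hi) // 2 on the nonnegative lo, hi is Nat division.  top[mid] is always in
-- range (lo ≤ mid < hi ≤ len top), so getD is exact.
def bsLoop (top : List Int) (s : Int) (lo hi : Nat) : Nat :=
  if lo < hi then
    let mid := (lo + hi) / 2
    if top.getD mid 0 < s then bsLoop top s (mid + 1) hi else bsLoop top s lo mid
  else lo
termination_by hi - lo
decreasing_by all_goals omega

-- literal transliteration of Source B: keep top ascending, binary-search the insertion point,
-- insert, drop the front element when the list exceeds k ('del top[0]' = tail on the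
-- nonempty list), record top[0] (getD: top is nonempty under Pre_).
def solution_alt (k : Int) (score : List Int) : List Int :=
  (score.foldl
    (fun (st : List Int × List Int) s =>
      let lo := bsLoop st.1 s 0 st.1.length
      let top1 := st.1.insertIdx lo s
      let top2 := if (top1.length : Int) > k then top1.tail else top1
      (top2, st.2 ++ [top2.getD 0 0]))
    ([], [])).2

-- ===== PRECONDITION & SPEC =====
-- With k ≤ 0 and a nonempty score both A and B raise IndexError (the hall/top list is
-- emptied before indexing); Pre_ excludes exactly those inputs and nothing A returns on.
def Pre_solution (k : Int) (score : List Int) : Prop := 1 ≤ k ∨ score = []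
instance (k : Int) (score : List Int) : Decidable (Pre_solution k score) := by
  unfold Pre_solution; infer_instance

def pvWitness_solution : Int × List Int := (3, [10, 100, 20, 150, 1, 100, 200])

def Spec_solution (k : Int) (score : List Int) (out : List Int) : Prop := out = solution_alt k score
instance (k : Int) (score : List Int) (out : List Int) : Decidable (Spec_solution k score out) := by
  unfold Spec_solution; infer_instance

-- ===== CLAIM (what is proved, stated in full; the proofs are below) =====
def Claim_equal_solution : Prop := ∀ (k : Int) (score : List Int), Dom_solution k score → Pre_solution k score → Spec_solution k score (solution k score)

-- ===== LEMMAS AND PROOFS =====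

-- named copies of the two fold bodies (proof helpers only)
def stepA (k : Int) (st : List Int × List Int) (s : Int) : List Int × List Int :=
  let hall1 := PySem.List.sorted (st.1 ++ [s]) (fun x => x) true
  let hall2 := if (hall1.length : Int) > k then hall1.dropLast else hall1
  (hall2, st.2 ++ [PySem.List.pyGetD hall2 (-1) 0])

def stepB (k : Int) (st : List Int × List Int) (s : Int) : List Int × List Int :=
  let lo := bsLoop st.1 s 0 st.1.length
  let top1 := st.1.insertIdx lo s
  let top2 := if (top1.length : Int) > k then top1.tail else top1
  (top2, st.2 ++ [top2.getD 0 0])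

theorem solutionA_eq (k : Int) (score : List Int) :
    solution k score = ((PySem.List.enumerate score 0).foldl (fun st p => stepA k st p.2) ([], [])).2 := rfl

theorem solutionB_eq (k : Int) (score : List Int) :
    solution_alt k score = (score.foldl (stepB k) ([], [])).2 := rfl

-- sorted lists are getD-monotone
theorem getD_mono_of_pairwise (l : List Int) (h : l.Pairwise (· ≤ ·)) {i j : Nat}
    (hij : i ≤ j) (hj : j < l.length) : l.getD i 0 ≤ l.getD j 0 := by
  rcases eq_or_lt_of_le hij with rfl | hlt
  · exact le_refl _
  · rw [List.getD_eq_getElem l 0 (lt_of_le_of_lt hij hj), List.getD_eq_getElem l 0 hj]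
    exact List.pairwise_iff_getElem.mp h i j _ _ hlt

-- binary-search invariant: the result of bsLoop separates the elements < s from those ≥ s
theorem bsLoop_spec (top : List Int) (s : Int) (hs : top.Pairwise (· ≤ ·)) :
    ∀ (n lo hi : Nat), hi - lo ≤ n → lo ≤ hi → hi ≤ top.length →
    (∀ i, i < lo → top.getD i 0 < s) →
    (∀ i, hi ≤ i → i < top.length → s ≤ top.getD i 0) →
    bsLoop top s lo hi ≤ top.length ∧
    (∀ i, i < bsLoop top s lo hi → top.getD i 0 < s) ∧
    (∀ i, bsLoop top s lo hi ≤ i → i < top.length → s ≤ top.getD i 0) := by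
  intro n
  induction n with
  | zero =>
    intro lo hi hn hlohi hhi h1 h2
    have : lo = hi := by omega
    subst this
    rw [bsLoop]
    simp only [lt_irrefl, if_false]
    exact ⟨hhi, h1, h2⟩
  | succ n ih =>
    intro lo hi hn hlohi hhi h1 h2
    rw [bsLoop]
    by_cases hlt : lo < hi
    · simp only [hlt, if_true]
      by_cases hcmp : top.getD ((lo + hi) / 2) 0 < s
      · simp only [hcmp, if_true]
        refine ih ((lo + hi) / 2 + 1) hi (by omega) (by omega) hhi ?_ h2
        intro i hi'
        by_cases hilo : i < lo
        · exact h1 i hilo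
        · exact lt_of_le_of_lt (getD_mono_of_pairwise top hs (by omega) (by omega)) hcmp
      · simp only [hcmp, if_false]
        refine ih lo ((lo + hi) / 2) (by omega) (by omega) (by omega) h1 ?_
        intro i hmid hilen
        have h0 : s ≤ top.getD ((lo + hi) / 2) 0 := le_of_not_gt hcmp
        exact le_trans h0 (getD_mono_of_pairwise top hs hmid hilen)
    · simp only [hlt, if_false]
      have heq : lo = hi := by omega
      subst heq
      exact ⟨hhi, h1, h2⟩

-- inserting s at an index that separates elements < s from elements ≥ s keeps the list sorted
theorem insertIdx_pairwise (s : Int) :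
    ∀ (l : List Int) (r : Nat), r ≤ l.length → l.Pairwise (· ≤ ·) →
    (∀ i, i < r → l.getD i 0 < s) →
    (∀ i, r ≤ i → i < l.length → s ≤ l.getD i 0) →
    (l.insertIdx r s).Pairwise (· ≤ ·) := by
  intro l
  induction l with
  | nil =>
    intro r hr _ _ _
    have : r = 0 := by simpa using hr
    subst this
    simp
  | cons a t ih =>
    intro r hr hp h1 h2
    cases r with
    | zero =>
      simp only [List.insertIdx_zero]
      refine List.Pairwise.cons ?_ hp
      intro y hy
      rcases List.mem_iff_getElem.mp hy with ⟨j, hj, rfl⟩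
      have := h2 j (Nat.zero_le _) hj
      rwa [List.getD_eq_getElem _ 0 hj] at this
    | succ r' =>
      simp only [List.insertIdx_succ_cons]
      have hp' := List.pairwise_cons.mp hp
      refine List.Pairwise.cons ?_ ?_
      · intro y hy
        rcases (List.mem_insertIdx (by simpa using hr)).mp hy with rfl | hyt
        · exact le_of_lt (by simpa using h1 0 (Nat.succ_pos _))
        · exact hp'.1 y hyt
      · refine ih r' (by simpa using hr) hp'.2 ?_ ?_
        · intro i hi
          simpa using h1 (i + 1) (by omega)
        · intro i hri hil
          simpa using h2 (i + 1) (by omega) (by simpa using hil)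

-- A's re-sort of (desc hall ++ [s]) is the reverse of B's binary insertion into the asc list
theorem sortA_eq (top : List Int) (s : Int) (hs : top.Pairwise (· ≤ ·)) :
    PySem.List.sorted (top.reverse ++ [s]) (fun x => x) true
      = (top.insertIdx (bsLoop top s 0 top.length) s).reverse := by
  obtain ⟨hle, h1, h2⟩ := bsLoop_spec top s hs top.length 0 top.length (by omega) (by omega)
    (le_refl _) (by omega) (by intro i hi hi'; omega)
  have hins : (top.insertIdx (bsLoop top s 0 top.length) s).Pairwise (· ≤ ·) :=
    insertIdx_pairwise s top _ hle hs h1 h2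
  have hperm : (PySem.List.sorted (top.reverse ++ [s]) (fun x => x) true).reverse.Perm
      (top.insertIdx (bsLoop top s 0 top.length) s) :=
    ((List.reverse_perm _).trans (PySem.List.sorted_perm _ _ _)).trans
      ((((List.reverse_perm top).append_right [s]).trans
        (List.perm_append_singleton s top)).trans (List.perm_insertIdx s top hle).symm)
  have hkey : (PySem.List.sorted (top.reverse ++ [s]) (fun x => x) true).reverse
      = top.insertIdx (bsLoop top s 0 top.length) s :=
    PySem.List.eq_of_perm_of_pairwise_le_of_injective (fun x : Int => x) (fun _ _ h => h)
      hperm (List.pairwise_reverse.mpr (PySem.List.sorted_pairwise_rev _ _)) hins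
  rw [← hkey, List.reverse_reverse]

-- A's fold ignores the enumerate index
theorem foldl_enumerate_snd (g : List Int × List Int → Int → List Int × List Int) :
    ∀ (xs : List Int) (n : Int) (st : List Int × List Int),
    (PySem.List.enumerate xs n).foldl (fun st p => g st p.2) st = xs.foldl g st := by
  intro xs
  induction xs with
  | nil => intro n st; simp [PySem.List.enumerate_nil]
  | cons x t ih => intro n st; rw [PySem.List.enumerate_cons]; simp only [List.foldl_cons]; exact ih _ _

-- the loop invariant: A's hall is throughout the reverse of B's ascending top list
theorem loop_eq (k : Int) (hk : 1 ≤ k) :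
    ∀ (score top out : List Int), top.Pairwise (· ≤ ·) →
    score.foldl (stepA k) (top.reverse, out)
      = (((score.foldl (stepB k) (top, out)).1).reverse, (score.foldl (stepB k) (top, out)).2) := by
  intro score
  induction score with
  | nil => intro top out _; rfl
  | cons s rest ih =>
    intro top out hs
    simp only [List.foldl_cons]
    obtain ⟨hle, h1, h2⟩ := bsLoop_spec top s hs top.length 0 top.length (by omega) (by omega)
      (le_refl _) (by omega) (by intro i hi hi'; omega)
    have hins : (top.insertIdx (bsLoop top s 0 top.length) s).Pairwise (· ≤ ·) :=
      insertIdx_pairwise s top _ hle hs h1 h2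
    set r := bsLoop top s 0 top.length with hr
    set top1 := top.insertIdx r s with htop1
    have hlen1 : top1.length = top.length + 1 := by
      rw [htop1, List.length_insertIdx_of_le_length hle]
    set top2 : List Int := if (top1.length : Int) > k then top1.tail else top1 with htop2
    have htop2ne : top2 ≠ [] := by
      rw [htop2]
      by_cases hc : (top1.length : Int) > k
      · rw [if_pos hc]
        have h2le : 2 ≤ top1.length := by omega
        intro hnil
        have := congrArg List.length hnil
        rw [List.length_tail] at this
        simp at this
        omega
      · rw [if_neg hc]
        intro hnil
        have := congrArg List.length hnil
        simp [hlen1] at this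
    have htop2sorted : top2.Pairwise (· ≤ ·) := by
      rw [htop2]
      by_cases hc : (top1.length : Int) > k
      · rw [if_pos hc]
        rcases htop1' : top1 with _ | ⟨c, t⟩
        · simp
        · exact (List.pairwise_cons.mp (htop1' ▸ hins)).2
      · rw [if_neg hc]; exact hins
    have hlast : PySem.List.pyGetD top2.reverse (-1) 0 = top2.getD 0 0 := by
      rcases htop2' : top2 with _ | ⟨c, t⟩
      · exact absurd htop2' htop2ne
      · rw [List.reverse_cons]
        simp [PySem.List.pyGetD_neg_one_append_singleton]
    have hstepB : stepB k (top, out) s = (top2, out ++ [top2.getD 0 0]) := by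
      simp only [stepB]
      rw [← hr, ← htop1, ← htop2]
    have hstepA : stepA k (top.reverse, out) s = (top2.reverse, out ++ [top2.getD 0 0]) := by
      simp only [stepA]
      rw [sortA_eq top s hs, ← hr, ← htop1]
      have hcond : ((top1.reverse.length : Int) > k) = ((top1.length : Int) > k) := by
        rw [List.length_reverse]
      have hhall2 : (if (top1.reverse.length : Int) > k then top1.reverse.dropLast else top1.reverse)
          = top2.reverse := by
        rw [htop2]
        by_cases hc : (top1.length : Int) > k
        · rw [if_pos (by simpa using hc), if_pos hc, List.dropLast_reverse]
        · rw [if_neg (by simpa using hc), if_neg hc]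
      rw [hhall2, hlast]
    rw [hstepA, hstepB]
    exact ih top2 (out ++ [top2.getD 0 0]) htop2sorted

-- ===== VERDICT (by name: the statement is the Claim_ definition above) =====
theorem solution_spec : Claim_equal_solution := by
  unfold Claim_equal_solution
  intro k score _ hpre
  unfold Spec_solution
  rw [solutionA_eq, solutionB_eq, foldl_enumerate_snd (stepA k)]
  rcases hpre with hk | rfl
  · have := loop_eq k hk score [] [] (by simp)
    simp only [List.reverse_nil] at this
    rw [this]
  · rfl
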